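-- pv_equiv track=rewrite | github.com/betinti/Simulador-de-Processos | PNet_06.py | menValVet
-- ===== SOURCE A (Python) =====
-- def menValVet(v):
--     x = v[0]
--     I = 0
--     for i in range(len(v)):
--         if x >= v[i]:
--             x = v[i]
--             I = i
--     return [x,I]
-- ===== SOURCE B (Python) =====
-- def menValVet(v):
--     x = v[0]
--     m = min(v)
--     I = len(v) - 1 - v[::-1].index(m)
--     return [m, I]
-- ===== Notes on version B (the rewrite author's own statement) =====
-- stated objective: simpler
-- what changed: Replaces A's single loop that tracks a running min and its index (with >= ties keeping the last) by a two-phase decomposition: take min(v), then locate its last occurrence via a reverse-slice index; v[0] is dereferenced first so the empty list still raises IndexError like A.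
import Mathlib
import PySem

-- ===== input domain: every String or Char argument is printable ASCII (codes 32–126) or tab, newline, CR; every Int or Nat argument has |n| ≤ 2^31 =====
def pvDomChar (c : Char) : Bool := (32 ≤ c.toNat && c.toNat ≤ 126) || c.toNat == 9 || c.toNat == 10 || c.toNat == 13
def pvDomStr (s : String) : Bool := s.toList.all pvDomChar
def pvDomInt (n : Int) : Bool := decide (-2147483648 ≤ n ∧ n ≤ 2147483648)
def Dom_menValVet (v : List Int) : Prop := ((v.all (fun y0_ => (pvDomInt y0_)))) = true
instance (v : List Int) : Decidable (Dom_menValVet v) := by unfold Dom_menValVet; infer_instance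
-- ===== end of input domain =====

-- B replaces A's combined min-and-last-index tracking loop by min(v) followed by a reverse search
-- for the last occurrence; objective: simpler two-phase decomposition (return value only, no mutation).

-- ===== PORT A =====
def menValVet (v : List Int) : List Int :=
  match PySem.List.pyGet? v 0 with
  | none => []   -- IndexError on empty v (excluded by Pre_)
  | some x0 =>
    let p := (PySem.List.pyRange 0 (v.length : Int) 1).foldl
      (fun (p : Int × Int) i =>
        let vi := PySem.List.pyGetD v i 0
        if p.1 ≥ vi then (vi, i) else p) (x0, 0)
    [p.1, p.2]

-- ===== PORT B =====
def menValVet_alt (v : List Int) : List Int :=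
  match PySem.List.pyGet? v 0 with
  | none => []   -- IndexError on empty v (excluded by Pre_)
  | some _ =>
    match PySem.List.min? v (fun y => y) with
    | none => []
    | some m =>
      match PySem.List.slice? v none none (-1) with
      | none => []
      | some rev =>
        match PySem.List.index? rev m with
        | none => []
        | some j => [m, (v.length : Int) - 1 - (j : Int)]

-- ===== PRECONDITION & SPEC =====
-- A raises IndexError on the empty list (v[0]); Pre_ excludes exactly that input.
def Pre_menValVet (v : List Int) : Prop := v ≠ []
instance (v : List Int) : Decidable (Pre_menValVet v) := by unfold Pre_menValVet; infer_instance
def pvWitness_menValVet : List Int := ([3, 1, 1, 2] : List Int)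

def Spec_menValVet (v : List Int) (out : List Int) : Prop := out = menValVet_alt v
instance (v : List Int) (out : List Int) : Decidable (Spec_menValVet v out) := by unfold Spec_menValVet; infer_instance

-- ===== CLAIM (what is proved, stated in full; the proofs are below) =====
def Claim_equal_menValVet : Prop := ∀ (v : List Int), Dom_menValVet v → Pre_menValVet v → Spec_menValVet v (menValVet v)

-- ===== LEMMAS AND PROOFS =====

-- reference loop: A's body as structural recursion over the remaining suffix, carrying the absolute index
def refFold (s : List Int) (a : Int) (p : Int × Int) : Int × Int :=
  match s with
  | [] => p
  | y :: ys => refFold ys (a + 1) (if p.1 ≥ y then (y, a) else p)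

theorem bridgeA (s : List Int) : ∀ (v : List Int) (a : Nat) (p : Int × Int),
    s = v.drop a →
    (PySem.List.pyRange (a : Int) ((a : Int) + (s.length : Int)) 1).foldl
      (fun (p : Int × Int) i =>
        let vi := PySem.List.pyGetD v i 0
        if p.1 ≥ vi then (vi, i) else p) p
    = refFold s (a : Int) p := by
  induction s with
  | nil => intro v a p h; simp [PySem.List.pyRange_one_eq_nil, refFold]
  | cons y ys ih =>
    intro v a p h
    have hlt : (a : Int) < (a : Int) + ((y :: ys).length : Int) := by
      have := Nat.succ_le_of_lt (Nat.succ_pos ys.length)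
      simp only [List.length_cons]
      push_cast
      omega
    rw [PySem.List.pyRange_one_cons hlt]
    have hmem : v[a]? = some y := by
      have h0 : (v.drop a)[0]? = some y := by rw [← h]; simp
      simpa using h0
    have hget : PySem.List.pyGetD v (a : Int) 0 = y := by
      simp [PySem.List.pyGetD_natCast, List.getD_eq_getElem?_getD, hmem]
    rw [List.foldl_cons]
    simp only [hget]
    have hcast : (a : Int) + ((y :: ys).length : Int) = ((a + 1 : Nat) : Int) + (ys.length : Int) := by
      simp [List.length_cons]; ring
    have hlow : ((a : Int) + 1) = ((a + 1 : Nat) : Int) := by push_cast; ring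
    have hdrop : ys = v.drop (a + 1) := by
      have := congrArg List.tail h
      simpa [List.tail_drop] using this
    rw [hcast, hlow, ih v (a + 1) _ hdrop]
    simp only [refFold]
    norm_cast

theorem foldl_min_le (t : List Int) : ∀ (x : Int), t.foldl min x ≤ x := by
  induction t with
  | nil => intro x; simp
  | cons y ys ih => intro x; exact le_trans (ih (min x y)) (min_le_left x y)

theorem foldl_min_mem (t : List Int) : ∀ (x : Int), t.foldl min x = x ∨ t.foldl min x ∈ t := by
  induction t with
  | nil => intro x; simp
  | cons y ys ih =>
    intro x
    rcases ih (min x y) with h | h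
    · rcases le_total x y with hxy | hxy
      · rw [min_eq_left hxy] at h; left; simpa [List.foldl_cons, min_eq_left hxy] using h
      · rw [min_eq_right hxy] at h; right; simp [List.foldl_cons, min_eq_right hxy, h]
    · right; simp [List.foldl_cons, h]

theorem index?_of_mem {l : List Int} {v : Int} (h : v ∈ l) :
    PySem.List.index? l v = some (l.idxOf v) := by
  induction l with
  | nil => cases h
  | cons b bs ih =>
    by_cases hb : b = v
    · subst hb
      rw [PySem.List.index?_cons_self]
      simp [List.idxOf_cons_self]
    · have hm : v ∈ bs := by
        rcases List.mem_cons.mp h with h1 | h1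
        · exact absurd h1.symm hb
        · exact h1
      rw [PySem.List.index?_cons_of_ne bs hb, ih hm]
      simp [List.idxOf_cons_ne bs hb]

theorem refFold_spec (s : List Int) : ∀ (a x I : Int),
    refFold s a (x, I) =
      if s.foldl min x ∈ s
      then (s.foldl min x, a + (s.length : Int) - 1 - ((s.reverse.idxOf (s.foldl min x) : Nat) : Int))
      else (x, I) := by
  induction s with
  | nil => intro a x I; simp [refFold]
  | cons y ys ih =>
    intro a x I
    have hm : (y :: ys).foldl min x = ys.foldl min (min x y) := by simp [List.foldl_cons]
    by_cases hxy : x ≥ y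
    · -- update fires: state becomes (y, a); min x y = y
      have hmin : min x y = y := min_eq_right hxy
      have hval : (y :: ys).foldl min x = ys.foldl min y := by rw [hm, hmin]
      simp only [refFold, if_pos hxy]
      rw [ih (a + 1) y a]
      have hm' : ys.foldl min y ≤ y := foldl_min_le ys y
      by_cases hys : ys.foldl min y ∈ ys
      · have hmemrev : ys.foldl min y ∈ ys.reverse := by simpa using hys
        have hmem2 : (y :: ys).foldl min x ∈ y :: ys := by rw [hval]; exact List.mem_cons_of_mem _ hys
        rw [if_pos hys, if_pos hmem2]
        have hidx : (y :: ys).reverse.idxOf ((y :: ys).foldl min x) = ys.reverse.idxOf (ys.foldl min y) := by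
          rw [hval]
          simp only [List.reverse_cons]
          exact List.idxOf_append_of_mem hmemrev
        rw [hidx]
        have hlen : ys.reverse.idxOf (ys.foldl min y) < ys.length := by
          simpa using List.idxOf_lt_length_of_mem hmemrev
        simp only [Prod.mk.injEq]
        exact ⟨by rw [hval], by simp only [List.length_cons]; push_cast; ring⟩
      · -- min not in ys ⇒ the min is y itself, last occurrence at index a
        rcases foldl_min_mem ys y with he | he
        · have hvy : (y :: ys).foldl min x = y := by rw [hval, he]
          have hmem2 : (y :: ys).foldl min x ∈ y :: ys := by rw [hvy]; exact List.mem_cons_self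
          rw [if_neg hys, if_pos hmem2]
          have hynotin : y ∉ ys.reverse := by rw [← he]; simpa using hys
          have hidx : (y :: ys).reverse.idxOf ((y :: ys).foldl min x) = ys.reverse.length := by
            rw [hvy]
            simp only [List.reverse_cons]
            rw [List.idxOf_append_of_notMem hynotin]
            simp
          rw [hidx]
          simp only [Prod.mk.injEq]
          exact ⟨by rw [hvy], by simp [List.length_cons]; ring⟩
        · exact absurd he hys
    · -- no update: min x y = x, state (x, I) unchanged
      rw [not_le] at hxy
      have hmin : min x y = x := min_eq_left (le_of_lt hxy)
      have hval : (y :: ys).foldl min x = ys.foldl min x := by rw [hm, hmin]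
      simp only [refFold, if_neg (not_le.mpr hxy)]
      rw [ih (a + 1) x I]
      have hle : ys.foldl min x ≤ x := foldl_min_le ys x
      have hne : ys.foldl min x ≠ y := by
        intro he; rw [he] at hle; exact absurd hxy (not_lt.mpr hle)
      by_cases hys : ys.foldl min x ∈ ys
      · have hmemrev : ys.foldl min x ∈ ys.reverse := by simpa using hys
        have hmem2 : (y :: ys).foldl min x ∈ y :: ys := by rw [hval]; exact List.mem_cons_of_mem _ hys
        rw [if_pos hys, if_pos hmem2]
        have hidx : (y :: ys).reverse.idxOf ((y :: ys).foldl min x) = ys.reverse.idxOf (ys.foldl min x) := by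
          rw [hval]
          simp only [List.reverse_cons]
          exact List.idxOf_append_of_mem hmemrev
        rw [hidx]
        simp only [Prod.mk.injEq]
        exact ⟨by rw [hval], by simp only [List.length_cons]; push_cast; ring⟩
      · have hmem2 : (y :: ys).foldl min x ∉ y :: ys := by
          rw [hval]; intro h; rcases List.mem_cons.mp h with h | h
          · exact hne h
          · exact hys h
        rw [if_neg hys, if_neg hmem2]

-- ===== VERDICT (by name: the statement is the Claim_ definition above) =====
theorem menValVet_spec : Claim_equal_menValVet := by
  intro v _ hpre
  unfold Spec_menValVet menValVet menValVet_alt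
  obtain ⟨x, t, rfl⟩ : ∃ x t, v = x :: t := by
    cases v with
    | nil => exact absurd rfl hpre
    | cons x t => exact ⟨x, t, rfl⟩
  have hget : PySem.List.pyGet? (x :: t) 0 = some x := by
    simp [PySem.List.pyGet?, PySem.List.pyIdx?]
  rw [hget]
  -- A side: reduce the pyRange fold to refFold, then apply refFold_spec
  have hbridge := bridgeA (x :: t) (x :: t) 0 (x, 0) (by simp)
  simp only [Nat.cast_zero, zero_add] at hbridge
  -- the fold's value
  set m := (x :: t).foldl min x with hmdef
  have hmmem : m ∈ x :: t := by
    rcases foldl_min_mem (x :: t) x with h | h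
    · rw [hmdef, h]; exact List.mem_cons_self
    · rw [hmdef]; exact h
  have hspec := refFold_spec (x :: t) 0 x 0
  rw [if_pos hmmem] at hspec
  -- B side primitives
  have hmin : PySem.List.min? (x :: t) (fun y => y) = some (t.foldl min x) :=
    PySem.List.min?_id_cons x t
  have hmval : t.foldl min x = m := by rw [hmdef]; simp [List.foldl_cons]
  rw [hmval] at hmin
  have hrev : PySem.List.slice? (x :: t) none none (-1) = some (x :: t).reverse :=
    PySem.List.slice?_none_none_neg_one (x :: t)
  have hmemrev : m ∈ (x :: t).reverse := List.mem_reverse.mpr hmmem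
  have hidx : PySem.List.index? (x :: t).reverse m = some ((x :: t).reverse.idxOf m) :=
    index?_of_mem hmemrev
  simp only [hmin, hrev, hidx, hbridge, hspec]
  simp only [List.cons.injEq, and_true]
  constructor
  · rfl
  · ring
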